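-- pv_equiv track=rewrite | github.com/mattedella/Python_Piscine_Django | Day01/ex05/all_in.py | all_in
-- ===== SOURCE A (Python) =====
-- def all_in(state):
--
-- 	states =  {
-- 		"Oregon" : "OR",
-- 		"Alabama" : "AL",
-- 		"New Jersey": "NJ",
-- 		"Colorado" : "CO"
-- 	}
--
-- 	capital_cities = {
-- 		"OR": "Salem",
-- 		"AL": "Montgomery",
-- 		"NJ": "Trenton",
-- 		"CO": "Denver"
-- 	}
--
-- 	lower_state = state.lower()
-- 	for key in states:
-- 		if key.lower() == lower_state:
-- 			state_found = states[key]
-- 			for key2 in capital_cities: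
-- 				if key2 == state_found:
-- 					return "{} is the capital of {}".format(capital_cities[key2], key)
--
-- 	for key, value in capital_cities.items():
-- 		if value == state:
-- 			for key2, value2 in states.items():
-- 				if value2 == key:
-- 					return "{} is the capital of {}".format(value, key2)
-- 	return "{} is neither a capital city nor a state".format(lower_state)
-- ===== SOURCE B (Python) =====
-- _PAIRS = (("Oregon", "Salem"), ("Alabama", "Montgomery"),
--           ("New Jersey", "Trenton"), ("Colorado", "Denver"))
--
-- _STATE_MSG = {name.lower(): "{} is the capital of {}".format(cap, name)
--               for name, cap in _PAIRS}
-- _CAPITAL_MSG = {cap: "{} is the capital of {}".format(cap, name)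
--                 for name, cap in _PAIRS}
--
--
-- def all_in(state):
--     lower = state.lower()
--     msg = _STATE_MSG.get(lower)
--     if msg is not None:
--         return msg
--     msg = _CAPITAL_MSG.get(state)
--     if msg is not None:
--         return msg
--     return "{} is neither a capital city nor a state".format(lower)
-- ===== Notes on version B (the rewrite author's own statement) =====
-- stated objective: simpler
-- what changed: Replaces A's four nested linear scans (state loop with an inner capital scan, then capital loop with an inner state scan) by two message tables precomputed once and two direct lookups.
import Mathlib
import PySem

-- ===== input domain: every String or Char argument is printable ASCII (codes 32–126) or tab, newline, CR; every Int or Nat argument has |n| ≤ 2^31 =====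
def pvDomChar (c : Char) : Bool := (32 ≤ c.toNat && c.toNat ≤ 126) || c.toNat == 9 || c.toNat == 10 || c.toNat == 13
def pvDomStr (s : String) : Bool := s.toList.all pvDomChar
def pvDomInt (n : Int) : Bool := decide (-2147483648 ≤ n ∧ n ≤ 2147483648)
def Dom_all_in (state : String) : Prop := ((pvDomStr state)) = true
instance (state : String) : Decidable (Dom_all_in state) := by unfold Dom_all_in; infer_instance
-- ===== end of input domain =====

-- B replaces A's four nested linear scans by two precomputed message tables and
-- two direct lookups (objective: simpler). Return behaviour only; A is total on strings.

-- ===== PORT A =====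
def statesA : PySem.Dict String String :=
  PySem.Dict.ofList [("Oregon", "OR"), ("Alabama", "AL"), ("New Jersey", "NJ"), ("Colorado", "CO")]

def capitalCitiesA : PySem.Dict String String :=
  PySem.Dict.ofList [("OR", "Salem"), ("AL", "Montgomery"), ("NJ", "Trenton"), ("CO", "Denver")]

-- inner loop: for key2 in capital_cities: if key2 == state_found: return …
def allInLoop2 (stateFound key : String) : List (String × String) → Option String
  | [] => none
  | (key2, _) :: rest =>
      if key2 == stateFound then
        some ((PySem.Dict.getD capitalCitiesA key2 "") ++ " is the capital of " ++ key)
      else allInLoop2 stateFound key rest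

-- outer loop: for key in states: if key.lower() == lower_state: …
def allInLoop1 (lowerState : String) : List (String × String) → Option String
  | [] => none
  | (key, _) :: rest =>
      if PySem.Str.lower key == lowerState then
        match allInLoop2 (PySem.Dict.getD statesA key "") key capitalCitiesA.items with
        | some r => some r
        | none => allInLoop1 lowerState rest
      else allInLoop1 lowerState rest

-- inner loop: for key2, value2 in states.items(): if value2 == key: return …
def allInLoop4 (key value : String) : List (String × String) → Option String
  | [] => none
  | (key2, value2) :: rest =>
      if value2 == key then some (value ++ " is the capital of " ++ key2)
      else allInLoop4 key value rest

-- loop: for key, value in capital_cities.items(): if value == state: …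
def allInLoop3 (state : String) : List (String × String) → Option String
  | [] => none
  | (key, value) :: rest =>
      if value == state then
        match allInLoop4 key value statesA.items with
        | some r => some r
        | none => allInLoop3 state rest
      else allInLoop3 state rest

def all_in (state : String) : String :=
  match allInLoop1 (PySem.Str.lower state) statesA.items with
  | some r => r
  | none =>
    match allInLoop3 state capitalCitiesA.items with
    | some r => r
    | none => PySem.Str.lower state ++ " is neither a capital city nor a state"

-- ===== PORT B =====
def pairsB : List (String × String) :=
  [("Oregon", "Salem"), ("Alabama", "Montgomery"), ("New Jersey", "Trenton"), ("Colorado", "Denver")]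

def stateMsgB : PySem.Dict String String :=
  pairsB.foldl (fun d p => d.insert (PySem.Str.lower p.1) (p.2 ++ " is the capital of " ++ p.1))
    PySem.Dict.empty

def capitalMsgB : PySem.Dict String String :=
  pairsB.foldl (fun d p => d.insert p.2 (p.2 ++ " is the capital of " ++ p.1)) PySem.Dict.empty

def all_in_alt (state : String) : String :=
  match PySem.Dict.get? stateMsgB (PySem.Str.lower state) with
  | some msg => msg
  | none =>
    match PySem.Dict.get? capitalMsgB state with
    | some msg => msg
    | none => PySem.Str.lower state ++ " is neither a capital city nor a state"

-- ===== PRECONDITION & SPEC =====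
def Spec_all_in (state : String) (out : String) : Prop := out = all_in_alt state
instance (state : String) (out : String) : Decidable (Spec_all_in state out) := by unfold Spec_all_in; infer_instance

-- ===== CLAIM (what is proved, stated in full; the proofs are below) =====
def Claim_equal_all_in : Prop := ∀ (state : String), Dom_all_in state → Spec_all_in state (all_in state)

-- ===== LEMMAS AND PROOFS =====

theorem statesA_items : statesA.items = [("Oregon", "OR"), ("Alabama", "AL"), ("New Jersey", "NJ"), ("Colorado", "CO")] := by decide

theorem capsA_items : capitalCitiesA.items = [("OR", "Salem"), ("AL", "Montgomery"), ("NJ", "Trenton"), ("CO", "Denver")] := by decide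

theorem stateMsgB_eq : stateMsgB = PySem.Dict.mk
    [("oregon", "Salem is the capital of Oregon"), ("alabama", "Montgomery is the capital of Alabama"),
     ("new jersey", "Trenton is the capital of New Jersey"), ("colorado", "Denver is the capital of Colorado")] := by decide

theorem capitalMsgB_eq : capitalMsgB = PySem.Dict.mk
    [("Salem", "Salem is the capital of Oregon"), ("Montgomery", "Montgomery is the capital of Alabama"),
     ("Trenton", "Trenton is the capital of New Jersey"), ("Denver", "Denver is the capital of Colorado")] := by decide

theorem lowerOregon : PySem.Str.lower "Oregon" = "oregon" := by decide
theorem lowerAlabama : PySem.Str.lower "Alabama" = "alabama" := by decide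
theorem lowerNJ : PySem.Str.lower "New Jersey" = "new jersey" := by decide
theorem lowerColorado : PySem.Str.lower "Colorado" = "colorado" := by decide

theorem get?_nil_str (x : String) : (PySem.Dict.mk ([] : List (String × String))).get? x = none := by
  simp [PySem.Dict.get?]

theorem all_in_eq (state : String) : all_in state = all_in_alt state := by
  by_cases c1 : state = "Salem"
  · subst c1; decide
  by_cases c2 : state = "Montgomery"
  · subst c2; decide
  by_cases c3 : state = "Trenton"
  · subst c3; decide
  by_cases c4 : state = "Denver"
  · subst c4; decide
  by_cases h1 : PySem.Str.lower state = "oregon"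
  · unfold all_in all_in_alt
    rw [h1, show allInLoop1 "oregon" statesA.items = some "Salem is the capital of Oregon" from by decide,
        show PySem.Dict.get? stateMsgB "oregon" = some "Salem is the capital of Oregon" from by decide]
  by_cases h2 : PySem.Str.lower state = "alabama"
  · unfold all_in all_in_alt
    rw [h2, show allInLoop1 "alabama" statesA.items = some "Montgomery is the capital of Alabama" from by decide,
        show PySem.Dict.get? stateMsgB "alabama" = some "Montgomery is the capital of Alabama" from by decide]
  by_cases h3 : PySem.Str.lower state = "new jersey"
  · unfold all_in all_in_alt
    rw [h3, show allInLoop1 "new jersey" statesA.items = some "Trenton is the capital of New Jersey" from by decide,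
        show PySem.Dict.get? stateMsgB "new jersey" = some "Trenton is the capital of New Jersey" from by decide]
  by_cases h4 : PySem.Str.lower state = "colorado"
  · unfold all_in all_in_alt
    rw [h4, show allInLoop1 "colorado" statesA.items = some "Denver is the capital of Colorado" from by decide,
        show PySem.Dict.get? stateMsgB "colorado" = some "Denver is the capital of Colorado" from by decide]
  -- no condition fires: both fall through to the "neither" message
  have n1 : ("oregon" == PySem.Str.lower state) = false := beq_eq_false_iff_ne.mpr (fun h => h1 h.symm)
  have n2 : ("alabama" == PySem.Str.lower state) = false := beq_eq_false_iff_ne.mpr (fun h => h2 h.symm)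
  have n3 : ("new jersey" == PySem.Str.lower state) = false := beq_eq_false_iff_ne.mpr (fun h => h3 h.symm)
  have n4 : ("colorado" == PySem.Str.lower state) = false := beq_eq_false_iff_ne.mpr (fun h => h4 h.symm)
  have m1 : ("Salem" == state) = false := beq_eq_false_iff_ne.mpr (fun h => c1 h.symm)
  have m2 : ("Montgomery" == state) = false := beq_eq_false_iff_ne.mpr (fun h => c2 h.symm)
  have m3 : ("Trenton" == state) = false := beq_eq_false_iff_ne.mpr (fun h => c3 h.symm)
  have m4 : ("Denver" == state) = false := beq_eq_false_iff_ne.mpr (fun h => c4 h.symm)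
  unfold all_in all_in_alt
  rw [statesA_items, capsA_items, stateMsgB_eq, capitalMsgB_eq]
  simp only [allInLoop1, allInLoop3, lowerOregon, lowerAlabama, lowerNJ, lowerColorado,
    PySem.Dict.get?_mk_cons, n1, n2, n3, n4, m1, m2, m3, m4, get?_nil_str,
    Bool.false_eq_true, if_false]

-- ===== VERDICT (by name: the statement is the Claim_ definition above) =====
theorem all_in_spec : Claim_equal_all_in := by
  intro state _
  exact all_in_eq state
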